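-- pv_equiv track=rewrite | github.com/miliar/Code_Jam_Webscraper | solutions_python/Problem_155/1869.py | solve
-- ===== SOURCE A (Python) =====
-- def solve(s):
-- 	people_up,people_needed = 0,0
-- 	for i in range(len(s)):
-- 		if(people_up < i):
-- 			people_needed += i-people_up
-- 			people_up = i
-- 		people_up += s[i]
-- 	return people_needed
-- ===== SOURCE B (Python) =====
-- def solve(s):
--     deficits = []
--     cur = 0
--     for i, x in enumerate(s):
--         deficits.append(i - cur)
--         cur += x
--     return max([0] + deficits)
-- ===== Notes on version B (the rewrite author's own statement) =====
-- stated objective: alternative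
-- what changed: Replaced A's incremental counter loop (conditionally pay the deficit and lift people_up) by a table-then-reduce decomposition: build the list of deficits i - prefix(i) over enumerate(s), then reduce with max, clamped at zero.
import Mathlib
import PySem

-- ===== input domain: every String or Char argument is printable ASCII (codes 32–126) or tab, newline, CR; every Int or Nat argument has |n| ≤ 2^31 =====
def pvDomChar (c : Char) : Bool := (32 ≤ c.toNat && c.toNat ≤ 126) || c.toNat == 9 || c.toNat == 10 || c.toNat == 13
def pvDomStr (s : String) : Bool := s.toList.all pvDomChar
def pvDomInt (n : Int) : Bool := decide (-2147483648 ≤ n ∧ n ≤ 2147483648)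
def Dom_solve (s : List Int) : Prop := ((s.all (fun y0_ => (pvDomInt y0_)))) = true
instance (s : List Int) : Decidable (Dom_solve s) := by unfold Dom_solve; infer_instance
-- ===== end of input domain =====

-- B builds the list of per-floor deficits i - prefix(i) in one pass and reduces it with max at the end
-- (table-then-reduce), instead of A's incremental "pay the deficit and lift the counter" loop; objective: alternative decomposition.


-- ===== PORT A =====
-- for i in range(len(s)): if people_up < i: pay the deficit; then people_up += s[i]
def solve (s : List Int) : Int :=
  ((PySem.List.pyRange 0 (PySem.List.len s) 1).foldl
    (fun (st : Int × Int) i =>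
      let st' := if st.1 < i then (i, st.2 + (i - st.1)) else (st.1, st.2)
      (st'.1 + PySem.List.pyGetD s i 0, st'.2))
    (0, 0)).2

-- ===== PORT B =====
-- one pass over enumerate(s) appending the deficit i - cur and updating cur; then the max of zero and the deficits
-- (Python's max over a nonempty list is the running-max fold, cf. PySem.List.max?_id_cons)
def solve_alt (s : List Int) : Int :=
  let r := (PySem.List.enumerate s 0).foldl
    (fun (st : List Int × Int) p => (st.1 ++ [p.1 - st.2], st.2 + p.2)) ([], 0)
  r.1.foldl max 0

-- ===== PRECONDITION & SPEC =====
def Spec_solve (s : List Int) (out : Int) : Prop := out = solve_alt s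
instance (s : List Int) (out : Int) : Decidable (Spec_solve s out) := by unfold Spec_solve; infer_instance

-- ===== CLAIM (what is proved, stated in full; the proofs are below) =====
def Claim_equal_solve : Prop := ∀ (s : List Int), Dom_solve s → Spec_solve s (solve s)

-- ===== LEMMAS AND PROOFS =====

-- the deficit list: for (i, x) at prefix cur, record i - cur, then advance cur by x
def pvDlist : List (Int × Int) → Int → List Int
  | [], _ => []
  | (i, x) :: t, cur => (i - cur) :: pvDlist t (cur + x)

-- A's loop, seen over (index, element) pairs, computes the running max of the deficits:
-- invariant people_up = cur + people_needed.
theorem pvA_fold (l : List (Int × Int)) : ∀ (cur pn : Int),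
    (l.foldl
      (fun (st : Int × Int) p =>
        let st' := if st.1 < p.1 then (p.1, st.2 + (p.1 - st.1)) else (st.1, st.2)
        (st'.1 + p.2, st'.2))
      (cur + pn, pn)).2 = (pvDlist l cur).foldl max pn := by
  induction l with
  | nil => intro cur pn; rfl
  | cons p t ih =>
      rcases p with ⟨i, x⟩
      intro cur pn
      simp only [List.foldl_cons, pvDlist]
      by_cases h : cur + pn < i
      · have hmax : max pn (i - cur) = i - cur := by omega
        simp only [if_pos h, hmax]
        have := ih (cur + x) (i - cur)
        simpa [show i + x = (cur + x) + (i - cur) by omega,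
               show pn + (i - (cur + pn)) = i - cur by omega] using this
      · have hmax : max pn (i - cur) = pn := by omega
        simp only [if_neg h, hmax]
        have := ih (cur + x) pn
        simpa [show cur + pn + x = (cur + x) + pn by omega] using this

-- B's first loop builds acc ++ deficits.
theorem pvB_fold (l : List (Int × Int)) : ∀ (acc : List Int) (cur : Int),
    (l.foldl (fun (st : List Int × Int) p => (st.1 ++ [p.1 - st.2], st.2 + p.2))
      (acc, cur)).1 = acc ++ pvDlist l cur := by
  induction l with
  | nil => intro acc cur; simp [pvDlist]
  | cons p t ih =>
      rcases p with ⟨i, x⟩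
      intro acc cur
      simp only [List.foldl_cons, pvDlist]
      rw [ih]
      simp

-- ===== VERDICT (by name: the statement is the Claim_ definition above) =====
theorem solve_spec : Claim_equal_solve := by
  intro s _
  simp only [Spec_solve, solve, solve_alt]
  rw [pvB_fold]
  have hA := pvA_fold (PySem.List.enumerate s 0) 0 0
  conv at hA => lhs; rw [PySem.List.enumerate_eq_map_pyRange (d := 0), List.foldl_map]
  simpa using hA
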